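-- pv_equiv track=rewrite | github.com/CXY1369/Job-Autopilot | autojobagent/core/intent_engine.py | fallback_label_intents
-- ===== SOURCE A (Python) =====
-- def fallback_label_intents(label: str) -> set[str]:
--     """当语义模型不可用时，使用极小硬规则集合兜底。"""
--     text = (label or "").strip().lower()
--     intents: set[str] = set()
--     if not text:
--         return intents
--
--     if any(k in text for k in ["apply", "application", "candidature"]):
--         intents.add("apply_entry")
--         intents.add("progression_action")
--     if any(k in text for k in ["next", "continue", "submit", "proceed", "review"]):
--         intents.add("progression_action")
--     if any(k in text for k in ["sign in", "log in", "login", "authenticate"]):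
--         intents.add("login_action")
--     if any(k in text for k in ["upload", "attach", "resume", "cv", "file"]):
--         intents.add("upload_request")
--     return intents
-- ===== SOURCE B (Python) =====
-- # Inverted scan: instead of searching the text once per keyword, slide a window over
-- # the text and look each window up in a keyword->intents hash table, then emit the
-- # fired intents in canonical order.
-- _KW = {
--     "apply": ("apply_entry", "progression_action"),
--     "application": ("apply_entry", "progression_action"),
--     "candidature": ("apply_entry", "progression_action"),
--     "next": ("progression_action",),
--     "continue": ("progression_action",),
--     "submit": ("progression_action",),
--     "proceed": ("progression_action",),
--     "review": ("progression_action",),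
--     "sign in": ("login_action",),
--     "log in": ("login_action",),
--     "login": ("login_action",),
--     "authenticate": ("login_action",),
--     "upload": ("upload_request",),
--     "attach": ("upload_request",),
--     "resume": ("upload_request",),
--     "cv": ("upload_request",),
--     "file": ("upload_request",),
-- }
-- _LENS = sorted({len(k) for k in _KW})
-- _ORDER = ("apply_entry", "progression_action", "login_action", "upload_request")
--
-- def fallback_label_intents(label: str) -> set[str]:
--     text = (label or "").strip().lower()
--     n = len(text)
--     fired = set()
--     for i in range(n):
--         for L in _LENS:
--             if i + L <= n:
--                 hit = _KW.get(text[i:i + L])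
--                 if hit is not None:
--                     fired.update(hit)
--     return {t for t in _ORDER if t in fired}
-- ===== Notes on version B (the rewrite author's own statement) =====
-- stated objective: alternative
-- what changed: Inverts the search: instead of four any()-branches testing each keyword against the text, B slides a window over the text and looks each window up in a keyword->intents hash table, then emits the fired intents in canonical order.
import Mathlib
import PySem

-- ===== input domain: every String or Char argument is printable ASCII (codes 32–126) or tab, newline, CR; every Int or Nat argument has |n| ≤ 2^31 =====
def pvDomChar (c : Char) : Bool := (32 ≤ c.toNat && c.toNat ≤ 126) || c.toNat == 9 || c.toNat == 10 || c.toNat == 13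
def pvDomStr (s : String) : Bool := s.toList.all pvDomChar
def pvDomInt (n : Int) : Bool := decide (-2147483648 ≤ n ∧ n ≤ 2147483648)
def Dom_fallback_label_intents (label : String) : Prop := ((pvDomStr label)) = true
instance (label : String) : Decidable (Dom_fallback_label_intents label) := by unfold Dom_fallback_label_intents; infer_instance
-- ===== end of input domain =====

-- B inverts A's search: instead of testing each keyword against the text, it slides a
-- window over the text and looks each window up in a keyword->intents dict, emitting
-- fired intents in canonical order (objective: alternative algorithm, same result set).


-- ===== PORT A =====
def fallback_label_intents (label : String) : List String :=
  let text := PySem.Str.lower (PySem.Str.strip (if label = "" then "" else label))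
  let intents : PySem.Set String := PySem.Set.empty
  if text = "" then intents
  else
    let intents :=
      if ["apply", "application", "candidature"].any (fun k => PySem.Str.isIn k text) then
        PySem.Set.add (PySem.Set.add intents "apply_entry") "progression_action"
      else intents
    let intents :=
      if ["next", "continue", "submit", "proceed", "review"].any (fun k => PySem.Str.isIn k text) then
        PySem.Set.add intents "progression_action"
      else intents
    let intents :=
      if ["sign in", "log in", "login", "authenticate"].any (fun k => PySem.Str.isIn k text) then
        PySem.Set.add intents "login_action"
      else intents
    let intents :=
      if ["upload", "attach", "resume", "cv", "file"].any (fun k => PySem.Str.isIn k text) then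
        PySem.Set.add intents "upload_request"
      else intents
    intents

-- ===== PORT B =====
def KW : PySem.Dict String (List String) :=
  PySem.Dict.ofList
    [("apply", ["apply_entry", "progression_action"]),
     ("application", ["apply_entry", "progression_action"]),
     ("candidature", ["apply_entry", "progression_action"]),
     ("next", ["progression_action"]),
     ("continue", ["progression_action"]),
     ("submit", ["progression_action"]),
     ("proceed", ["progression_action"]),
     ("review", ["progression_action"]),
     ("sign in", ["login_action"]),
     ("log in", ["login_action"]),
     ("login", ["login_action"]),
     ("authenticate", ["login_action"]),
     ("upload", ["upload_request"]),
     ("attach", ["upload_request"]),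
     ("resume", ["upload_request"]),
     ("cv", ["upload_request"]),
     ("file", ["upload_request"])]

def LENS : List Int :=
  PySem.List.sorted (PySem.Set.ofList ((PySem.Dict.keys KW).map PySem.Str.len)) (fun x => x) false

def ORDER : List String := ["apply_entry", "progression_action", "login_action", "upload_request"]

def fallback_label_intents_alt (label : String) : List String :=
  let text := PySem.Str.lower (PySem.Str.strip (if label = "" then "" else label))
  let n := PySem.Str.len text
  let fired : PySem.Set String :=
    (PySem.List.pyRange 0 n).foldl (fun fired i =>
      LENS.foldl (fun fired L =>
        if i + L ≤ n then
          match PySem.Dict.get? KW (PySem.Str.slice text (some i) (some (i + L))) with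
          | some hit => PySem.Set.update fired hit
          | none => fired
        else fired) fired)
      (PySem.Set.empty : PySem.Set String)
  ORDER.foldl (fun s t => if PySem.Set.contains fired t then PySem.Set.add s t else s)
    (PySem.Set.empty : PySem.Set String)

-- ===== PRECONDITION & SPEC =====
def Spec_fallback_label_intents (label : String) (out : List String) : Prop := out = fallback_label_intents_alt label
instance (label : String) (out : List String) : Decidable (Spec_fallback_label_intents label out) := by unfold Spec_fallback_label_intents; infer_instance

-- ===== CLAIM =====
def Claim_equal_fallback_label_intents : Prop := ∀ (label : String), Dom_fallback_label_intents label → Spec_fallback_label_intents label (fallback_label_intents label)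

-- ===== LEMMAS AND PROOFS =====

-- proof-side abbreviations for B's two stages
def firedSet (text : String) : PySem.Set String :=
  let n := PySem.Str.len text
  (PySem.List.pyRange 0 n).foldl (fun fired i =>
    LENS.foldl (fun fired L =>
      if i + L ≤ n then
        match PySem.Dict.get? KW (PySem.Str.slice text (some i) (some (i + L))) with
        | some hit => PySem.Set.update fired hit
        | none => fired
      else fired) fired)
    (PySem.Set.empty : PySem.Set String)

theorem alt_eq (label : String) :
    fallback_label_intents_alt label
      = ORDER.foldl
          (fun s t => if PySem.Set.contains (firedSet (PySem.Str.lower (PySem.Str.strip (if label = "" then "" else label)))) t then PySem.Set.add s t else s)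
          (PySem.Set.empty : PySem.Set String) := rfl

theorem LENS_eq : LENS = [2, 4, 5, 6, 7, 8, 11, 12] := by decide

-- generic membership through a set-accumulating fold
theorem mem_foldl_set {α : Type} (l : List α) (g : PySem.Set String → α → PySem.Set String)
    (P : α → String → Prop) (y : String)
    (h : ∀ (s : PySem.Set String) (x : α), x ∈ l → (y ∈ g s x ↔ y ∈ s ∨ P x y))
    (s : PySem.Set String) :
    y ∈ l.foldl g s ↔ y ∈ s ∨ ∃ x ∈ l, P x y := by
  induction l generalizing s with
  | nil => simp
  | cons a l ih =>
    rw [List.foldl_cons, ih (fun s x hx => h s x (List.mem_cons_of_mem _ hx)),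
      h s a (List.mem_cons_self)]
    simp only [List.mem_cons]
    constructor
    · rintro ((hy | hp) | ⟨x, hx, hp⟩)
      · exact Or.inl hy
      · exact Or.inr ⟨a, Or.inl rfl, hp⟩
      · exact Or.inr ⟨x, Or.inr hx, hp⟩
    · rintro (hy | ⟨x, hx | hx, hp⟩)
      · exact Or.inl (Or.inl hy)
      · exact Or.inl (Or.inr (hx ▸ hp))
      · exact Or.inr ⟨x, hx, hp⟩

-- every key of KW is nonempty and has its length in LENS
theorem keys_facts :
    KW.keys.all (fun k => decide (k ≠ "") && decide ((PySem.Str.len k) ∈ LENS)) = true := by decide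

-- membership in B's fired set = some keyword of KW carrying y occurs in the text
theorem mem_fired (text y : String) :
    y ∈ firedSet text
      ↔ ∃ kw hit, PySem.Dict.get? KW kw = some hit ∧ y ∈ hit ∧ PySem.Str.isIn kw text = true := by
  unfold firedSet
  rw [mem_foldl_set _ _
      (fun i y => ∃ L ∈ LENS, i + L ≤ PySem.Str.len text ∧
        ∃ hit, PySem.Dict.get? KW (PySem.Str.slice text (some i) (some (i + L))) = some hit ∧ y ∈ hit)
      y ?hout]
  case hout =>
    intro s i _
    refine mem_foldl_set LENS _
        (fun L y => i + L ≤ PySem.Str.len text ∧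
          ∃ hit, PySem.Dict.get? KW (PySem.Str.slice text (some i) (some (i + L))) = some hit ∧ y ∈ hit)
        y ?_ s
    intro s L _
    split_ifs with hle
    · cases hget : PySem.Dict.get? KW (PySem.Str.slice text (some i) (some (i + L))) with
      | none => simp [hget]
      | some hit =>
        rw [PySem.Set.mem_update]
        constructor
        · rintro (hy | hy)
          · exact Or.inl hy
          · exact Or.inr ⟨hle, hit, hget, hy⟩
        · rintro (hy | ⟨-, h', hget', hy⟩)
          · exact Or.inl hy
          · rw [hget] at hget'
            cases hget'
            exact Or.inr hy
    · constructor
      · exact fun hy => Or.inl hy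
      · rintro (hy | ⟨hle', -⟩)
        · exact hy
        · exact absurd hle' hle
  simp only [PySem.Set.empty, List.not_mem_nil, false_or]
  constructor
  · rintro ⟨i, hi, L, hL, hle, hit, hget, hy⟩
    rw [PySem.List.mem_pyRange_one] at hi
    refine ⟨PySem.Str.slice text (some i) (some (i + L)), hit, hget, hy, ?_⟩
    -- the window is an infix of the text
    rw [PySem.Str.isIn_eq, ← PySem.Chars.exists_prefix_drop_iff_isIn]
    have hL0 : 0 ≤ L := by rw [LENS_eq] at hL; fin_cases hL <;> omega
    obtain ⟨a, ha⟩ : ∃ a : Nat, i = (a : Int) := ⟨i.toNat, by omega⟩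
    obtain ⟨m, hm⟩ : ∃ m : Nat, i + L = (m : Int) := ⟨(i + L).toNat, by omega⟩
    refine ⟨a, ?_⟩
    rw [PySem.Str.toList_slice, hm, ha, PySem.Chars.slice_eq_listSlice, PySem.List.slice_natCast]
    exact List.take_prefix _ _
  · rintro ⟨kw, hit, hget, hy, hin⟩
    have hkmem : kw ∈ KW.keys := by
      rw [← PySem.Dict.contains_iff_mem_keys, PySem.Dict.contains_eq_isSome_get?, hget]; rfl
    have hfacts := (List.all_eq_true.mp keys_facts) kw hkmem
    rw [Bool.and_eq_true, decide_eq_true_eq, decide_eq_true_eq] at hfacts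
    obtain ⟨hne, hlen⟩ := hfacts
    rw [PySem.Str.isIn_eq, ← PySem.Chars.exists_prefix_drop_iff_isIn] at hin
    obtain ⟨j, hpre⟩ := hin
    have hklen : kw.toList ≠ [] := fun h => hne (String.toList_inj.mp h)
    have hlenle : kw.toList.length ≤ text.toList.length - j := by
      have := hpre.length_le
      simpa using this
    have hj : j < text.toList.length := by
      rcases Nat.lt_or_ge j text.toList.length with h | h
      · exact h
      · exfalso
        have : text.toList.drop j = [] := List.drop_eq_nil_of_le h
        rw [this] at hpre
        exact hklen (List.prefix_nil.mp hpre)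
    have hkpos : 0 < kw.toList.length := List.length_pos_of_ne_nil hklen
    refine ⟨(j : Int), ?_, PySem.Str.len kw, hlen, ?_, hit, ?_, hy⟩
    · rw [PySem.List.mem_pyRange_one, PySem.Str.len_eq]
      constructor
      · exact Int.natCast_nonneg j
      · exact_mod_cast hj
    · rw [PySem.Str.len_eq, PySem.Str.len_eq]
      have : j + kw.toList.length ≤ text.toList.length := by omega
      exact_mod_cast this
    · have hslice : PySem.Str.slice text (some (j : Int)) (some ((j : Int) + PySem.Str.len kw)) = kw := by
        apply String.toList_inj.mp
        rw [PySem.Str.toList_slice, PySem.Str.len_eq]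
        have hm : (j : Int) + (kw.toList.length : Int) = ((j + kw.toList.length : Nat) : Int) := by
          push_cast; ring
        rw [hm, PySem.Chars.slice_eq_listSlice, PySem.List.slice_natCast]
        have htake : j + kw.toList.length - j = kw.toList.length := by omega
        rw [htake]
        exact (List.prefix_iff_eq_take.mp hpre).symm
      rw [hslice]
      exact hget

-- contains on the fired set for one intent = 'some keyword of a group occurs', Bool form
theorem contains_fired_iff (text y : String) :
    PySem.Set.contains (firedSet text) y = true
      ↔ ∃ kw hit, PySem.Dict.get? KW kw = some hit ∧ y ∈ hit ∧ PySem.Str.isIn kw text = true := by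
  rw [PySem.Set.contains_iff]
  exact mem_fired text y

theorem contains_apply (text : String) :
    PySem.Set.contains (firedSet text) "apply_entry"
      = ["apply", "application", "candidature"].any (fun k => PySem.Str.isIn k text) := by
  rw [Bool.eq_iff_iff, contains_fired_iff, List.any_eq_true]
  constructor
  · rintro ⟨kw, hit, hget, hy, hin⟩
    have hmem := PySem.Dict.mem_items_of_get?_eq_some KW hget
    fin_cases hmem <;> simp_all
  · rintro ⟨kw, hkw, hin⟩
    fin_cases hkw
    · exact ⟨"apply", _, rfl, by decide, hin⟩
    · exact ⟨"application", _, rfl, by decide, hin⟩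
    · exact ⟨"candidature", _, rfl, by decide, hin⟩

theorem contains_progression (text : String) :
    PySem.Set.contains (firedSet text) "progression_action"
      = (["apply", "application", "candidature"].any (fun k => PySem.Str.isIn k text)
          || ["next", "continue", "submit", "proceed", "review"].any (fun k => PySem.Str.isIn k text)) := by
  rw [Bool.eq_iff_iff, contains_fired_iff, Bool.or_eq_true, List.any_eq_true, List.any_eq_true]
  constructor
  · rintro ⟨kw, hit, hget, hy, hin⟩
    have hmem := PySem.Dict.mem_items_of_get?_eq_some KW hget
    fin_cases hmem <;> simp_all
  · rintro (⟨kw, hkw, hin⟩ | ⟨kw, hkw, hin⟩)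
    · fin_cases hkw
      · exact ⟨"apply", _, rfl, by decide, hin⟩
      · exact ⟨"application", _, rfl, by decide, hin⟩
      · exact ⟨"candidature", _, rfl, by decide, hin⟩
    · fin_cases hkw
      · exact ⟨"next", _, rfl, by decide, hin⟩
      · exact ⟨"continue", _, rfl, by decide, hin⟩
      · exact ⟨"submit", _, rfl, by decide, hin⟩
      · exact ⟨"proceed", _, rfl, by decide, hin⟩
      · exact ⟨"review", _, rfl, by decide, hin⟩

theorem contains_login (text : String) :
    PySem.Set.contains (firedSet text) "login_action"
      = ["sign in", "log in", "login", "authenticate"].any (fun k => PySem.Str.isIn k text) := by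
  rw [Bool.eq_iff_iff, contains_fired_iff, List.any_eq_true]
  constructor
  · rintro ⟨kw, hit, hget, hy, hin⟩
    have hmem := PySem.Dict.mem_items_of_get?_eq_some KW hget
    fin_cases hmem <;> simp_all
  · rintro ⟨kw, hkw, hin⟩
    fin_cases hkw
    · exact ⟨"sign in", _, rfl, by decide, hin⟩
    · exact ⟨"log in", _, rfl, by decide, hin⟩
    · exact ⟨"login", _, rfl, by decide, hin⟩
    · exact ⟨"authenticate", _, rfl, by decide, hin⟩

theorem contains_upload (text : String) :
    PySem.Set.contains (firedSet text) "upload_request"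
      = ["upload", "attach", "resume", "cv", "file"].any (fun k => PySem.Str.isIn k text) := by
  rw [Bool.eq_iff_iff, contains_fired_iff, List.any_eq_true]
  constructor
  · rintro ⟨kw, hit, hget, hy, hin⟩
    have hmem := PySem.Dict.mem_items_of_get?_eq_some KW hget
    fin_cases hmem <;> simp_all
  · rintro ⟨kw, hkw, hin⟩
    fin_cases hkw
    · exact ⟨"upload", _, rfl, by decide, hin⟩
    · exact ⟨"attach", _, rfl, by decide, hin⟩
    · exact ⟨"resume", _, rfl, by decide, hin⟩
    · exact ⟨"cv", _, rfl, by decide, hin⟩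
    · exact ⟨"file", _, rfl, by decide, hin⟩

-- with the four group flags known, B's ORDER fold equals A's branch nest
theorem assemble (fired : PySem.Set String) (c1 c2 c3 c4 : Bool)
    (h1 : PySem.Set.contains fired "apply_entry" = c1)
    (h2 : PySem.Set.contains fired "progression_action" = (c1 || c2))
    (h3 : PySem.Set.contains fired "login_action" = c3)
    (h4 : PySem.Set.contains fired "upload_request" = c4) :
    (let intents : PySem.Set String := PySem.Set.empty
     let intents := if c1 then PySem.Set.add (PySem.Set.add intents "apply_entry") "progression_action" else intents
     let intents := if c2 then PySem.Set.add intents "progression_action" else intents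
     let intents := if c3 then PySem.Set.add intents "login_action" else intents
     let intents := if c4 then PySem.Set.add intents "upload_request" else intents
     intents)
      = ORDER.foldl (fun s t => if PySem.Set.contains fired t then PySem.Set.add s t else s)
          (PySem.Set.empty : PySem.Set String) := by
  simp only [ORDER, List.foldl_cons, List.foldl_nil, h1, h2, h3, h4]
  cases c1 <;> cases c2 <;> cases c3 <;> cases c4 <;> rfl

theorem fired_empty : firedSet "" = [] := by decide

-- ===== VERDICT =====
theorem fallback_label_intents_spec : Claim_equal_fallback_label_intents := by
  intro label _
  unfold Spec_fallback_label_intents fallback_label_intents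
  rw [alt_eq]
  set t := PySem.Str.lower (PySem.Str.strip (if label = "" then "" else label)) with ht
  by_cases h0 : t = ""
  · rw [h0, fired_empty]
    rfl
  · rw [if_neg h0]
    exact assemble (firedSet t) _ _ _ _ (contains_apply t) (contains_progression t)
      (contains_login t) (contains_upload t)
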